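-- pv_equiv track=rewrite | github.com/jonathanvanschenck/Project-Euler | solutions/0066/0066.py | square_factor
-- ===== SOURCE A (Python) =====
-- def square_factor(number):
--     n = 2
--     ns = 4
--     dividend = 1*number
--     sq_fact = []
--     while ns <= dividend:
--         if dividend % ns == 0:
--             sq_fact.append(n)
--             dividend = dividend // ns
--         else:
--             ns = ns + 2 * n + 1
--             n += 1
--     return sq_fact, dividend
-- ===== SOURCE B (Python) =====
-- def square_factor(number):
--     sq_fact = []
--     m = number
--     d = 2
--     while d * d <= m:
--         e = 0
--         while m % d == 0:
--             m //= d
--             e += 1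
--         sq_fact.extend([d] * (e // 2))
--         d += 1
--     divisor = 1
--     for p in sq_fact:
--         divisor *= p * p
--     return sq_fact, number // divisor
-- ===== Notes on version B (the rewrite author's own statement) =====
-- stated objective: alternative
-- what changed: B computes a full trial-division prime factorization (inner loop counts the whole exponent e of each divisor d of the shrinking core m, contributing e//2 square factors) and recovers the remainder as number // product(p*p), instead of A's single interleaved loop that repeatedly tests and strips one square n*n at a time from the dividend.
import Mathlib
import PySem

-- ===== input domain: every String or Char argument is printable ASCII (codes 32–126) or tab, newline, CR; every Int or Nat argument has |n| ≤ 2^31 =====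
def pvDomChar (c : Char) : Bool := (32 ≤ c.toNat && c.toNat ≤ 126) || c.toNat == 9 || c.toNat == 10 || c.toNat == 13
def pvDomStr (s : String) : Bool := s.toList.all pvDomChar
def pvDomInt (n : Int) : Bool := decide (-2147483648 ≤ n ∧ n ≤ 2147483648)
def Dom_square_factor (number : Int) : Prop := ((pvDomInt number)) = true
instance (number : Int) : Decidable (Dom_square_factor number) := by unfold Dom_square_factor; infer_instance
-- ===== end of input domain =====

-- B restructures A's interleaved square-stripping loop as a full trial-division factorization
-- (count the whole exponent of each divisor, take e//2 squares, recover the core by exact division);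
-- objective: alternative (same asymptotic cost, plainly different decomposition).

-- ===== PORT A =====
-- arithmetic helper cited by the termination proofs of both ports
theorem pv_ediv_lt_self {a b : Int} (ha : 0 < a) (hb : 2 ≤ b) : a / b < a := by
  rw [Int.ediv_lt_iff_lt_mul (by omega)]
  nlinarith
-- A's while loop; the guard conjuncts 2 ≤ n and 4 ≤ ns only make the recursion total
-- (they hold on every reachable state: n starts at 2 and only increases, ns starts at 4 and only increases).
def square_factor_loop (n ns dividend : Int) (acc : List Int) : List Int × Int :=
  if h : 2 ≤ n ∧ 4 ≤ ns ∧ ns ≤ dividend then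
    if PySem.Int.mod dividend ns = 0 then
      square_factor_loop n ns (PySem.Int.floordiv dividend ns) (acc ++ [n])
    else
      square_factor_loop (n + 1) (ns + 2 * n + 1) dividend acc
  else (acc, dividend)
termination_by (dividend.toNat, (dividend + 1 - ns).toNat)
decreasing_by
  · left
    have h4 : (4:Int) ≤ dividend := le_trans h.2.1 h.2.2
    have hmod := PySem.Int.mod_eq_zero_iff_dvd dividend ns
    have hdvd : ns ∣ dividend := hmod.mp (by assumption)
    have hlt : PySem.Int.floordiv dividend ns < dividend := by
      rw [PySem.Int.floordiv_eq_ediv_of_pos (by omega)]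
      exact pv_ediv_lt_self (by omega) (by omega)
    have hge : (0:Int) ≤ PySem.Int.floordiv dividend ns := by
      rw [PySem.Int.floordiv_eq_ediv_of_pos (by omega)]
      exact Int.ediv_nonneg (by omega) (by omega)
    omega
  · right
    omega

def square_factor (number : Int) : List Int × Int :=
  square_factor_loop 2 4 (1 * number) []

-- ===== PORT B =====
-- inner `while m % d == 0` loop of B: returns (e, m // d^e); guard 2 ≤ d ∧ 1 ≤ m for totality
def square_factor_alt_pull (d m : Int) : Int × Int :=
  if h : 2 ≤ d ∧ 1 ≤ m ∧ PySem.Int.mod m d = 0 then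
    let p := square_factor_alt_pull d (PySem.Int.floordiv m d)
    (p.1 + 1, p.2)
  else (0, m)
termination_by m.toNat
decreasing_by
  have hdvd : d ∣ m := (PySem.Int.mod_eq_zero_iff_dvd m d).mp h.2.2
  have hlt : PySem.Int.floordiv m d < m := by
    rw [PySem.Int.floordiv_eq_ediv_of_pos (by omega)]
    exact pv_ediv_lt_self (by omega) (by omega)
  have hge : (0:Int) ≤ PySem.Int.floordiv m d := by
    rw [PySem.Int.floordiv_eq_ediv_of_pos (by omega)]
    exact Int.ediv_nonneg (by omega) (by omega)
  omega

-- the inner loop never increases m (needed for termination of the outer loop)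
theorem square_factor_alt_pull_le (d m : Int) : (square_factor_alt_pull d m).2 ≤ m := by
  unfold square_factor_alt_pull
  split
  · rename_i h
    have hdvd : d ∣ m := (PySem.Int.mod_eq_zero_iff_dvd m d).mp h.2.2
    have hlt : PySem.Int.floordiv m d < m := by
      rw [PySem.Int.floordiv_eq_ediv_of_pos (by omega)]
      exact pv_ediv_lt_self (by omega) (by omega)
    have := square_factor_alt_pull_le d (PySem.Int.floordiv m d)
    simpa using le_trans this (le_of_lt hlt)
  · simp
termination_by m.toNat
decreasing_by
  rename_i h
  have hdvd : d ∣ m := (PySem.Int.mod_eq_zero_iff_dvd m d).mp h.2.2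
  have hlt : PySem.Int.floordiv m d < m := by
    rw [PySem.Int.floordiv_eq_ediv_of_pos (by omega)]
    exact pv_ediv_lt_self (by omega) (by omega)
  have hge : (0:Int) ≤ PySem.Int.floordiv m d := by
    rw [PySem.Int.floordiv_eq_ediv_of_pos (by omega)]
    exact Int.ediv_nonneg (by omega) (by omega)
  omega

-- outer `while d*d <= m` loop of B; guard 2 ≤ d for totality
def square_factor_alt_loop (d m : Int) (acc : List Int) : List Int × Int :=
  if h : 2 ≤ d ∧ d * d ≤ m then
    let p := square_factor_alt_pull d m
    square_factor_alt_loop (d + 1) p.2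
      (acc ++ List.replicate (PySem.Int.floordiv p.1 2).toNat d)
  else (acc, m)
termination_by (m + 1 - d).toNat
decreasing_by
  have hle := square_factor_alt_pull_le d m
  have hd : d ≤ m := by nlinarith [h.1, h.2]
  omega

def square_factor_alt (number : Int) : List Int × Int :=
  let r := square_factor_alt_loop 2 number []
  let divisor := r.1.foldl (fun acc p => acc * (p * p)) 1
  (r.1, PySem.Int.floordiv number divisor)

-- ===== PRECONDITION & SPEC =====
def Spec_square_factor (number : Int) (out : List Int × Int) : Prop := out = square_factor_alt number
instance (number : Int) (out : List Int × Int) : Decidable (Spec_square_factor number out) := by unfold Spec_square_factor; infer_instance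

-- ===== CLAIM (what is proved, stated in full; the proofs are below) =====
def Claim_equal_square_factor : Prop := ∀ (number : Int), Dom_square_factor number → Spec_square_factor number (square_factor number)


-- ===== LEMMAS AND PROOFS =====

-- Nat-level mirrors of the two loops (proof-only helpers)
def natLoopA (n D : Nat) (acc : List Nat) : List Nat × Nat :=
  if h : 2 ≤ n ∧ n * n ≤ D then
    if n * n ∣ D then natLoopA n (D / (n * n)) (acc ++ [n])
    else natLoopA (n + 1) D acc
  else (acc, D)
termination_by (D, D + 1 - n * n)
decreasing_by
  · left
    have h1 : 1 < n * n := by nlinarith [h.1]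
    have h2 := h.2
    exact Nat.div_lt_self (by omega) h1
  · right
    have : n * n < (n+1) * (n+1) := by nlinarith [h.1]
    omega

def natPull (d m : Nat) : Nat × Nat :=
  if h : 2 ≤ d ∧ 1 ≤ m ∧ m % d = 0 then
    let p := natPull d (m / d)
    (p.1 + 1, p.2)
  else (0, m)
termination_by m
decreasing_by exact Nat.div_lt_self (by omega) (by omega)

theorem natPull_le (d m : Nat) : (natPull d m).2 ≤ m := by
  unfold natPull
  split
  · rename_i h
    have hlt : m / d < m := Nat.div_lt_self (by omega) (by omega)
    have ih := natPull_le d (m / d)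
    simpa using le_trans ih (le_of_lt hlt)
  · simp
termination_by m
decreasing_by
  rename_i h
  exact Nat.div_lt_self (by omega) (by omega)

def natLoopB (d m : Nat) (acc : List Nat) : List Nat × Nat :=
  if h : 2 ≤ d ∧ d * d ≤ m then
    let p := natPull d m
    natLoopB (d + 1) p.2 (acc ++ List.replicate (p.1 / 2) d)
  else (acc, m)
termination_by m + 1 - d
decreasing_by
  have h1 := natPull_le d m
  have h2 : d < m := by nlinarith [h.1, h.2]
  omega

def prodSq (l : List Nat) : Nat := l.foldl (fun a p => a * (p * p)) 1

-- ===== bridges: the Int ports compute the casts of the Nat loops =====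
theorem bridge_pull (m : Nat) : ∀ (d : Nat), 2 ≤ d →
    square_factor_alt_pull (d : Int) (m : Int) =
      (((natPull d m).1 : Int), ((natPull d m).2 : Int)) := by
  induction m using Nat.strong_induction_on with
  | _ m IH =>
    intro d hd
    rw [square_factor_alt_pull, natPull]
    by_cases h : 1 ≤ m ∧ m % d = 0
    · have hc : 2 ≤ (d : Int) ∧ 1 ≤ (m : Int) ∧ PySem.Int.mod (m : Int) (d : Int) = 0 := by
        refine ⟨by exact_mod_cast hd, by exact_mod_cast h.1, ?_⟩
        rw [PySem.Int.mod_natCast]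
        exact_mod_cast congrArg (fun k : Nat => (k : Int)) h.2
      rw [dif_pos hc, dif_pos ⟨hd, h⟩]
      have hflo : PySem.Int.floordiv (m : Int) (d : Int) = ((m / d : Nat) : Int) :=
        PySem.Int.floordiv_natCast m d
      have hlt : m / d < m := Nat.div_lt_self (by omega) (by omega)
      simp only [hflo, IH (m / d) hlt d hd]
      push_cast
      rfl
    · have hcI : ¬ (2 ≤ (d : Int) ∧ 1 ≤ (m : Int) ∧ PySem.Int.mod (m : Int) (d : Int) = 0) := by
        rintro ⟨h1, h2, h3⟩
        apply h
        refine ⟨by exact_mod_cast h2, ?_⟩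
        rw [PySem.Int.mod_natCast] at h3
        exact_mod_cast h3
      rw [dif_neg hcI, dif_neg (fun hh => h ⟨hh.2.1, hh.2.2⟩)]
      simp

theorem bridge_loopB (μ : Nat) : ∀ (d m : Nat) (acc : List Nat), m + 1 - d < μ → 2 ≤ d →
    square_factor_alt_loop (d : Int) (m : Int) (acc.map (Nat.cast : Nat → Int)) =
      ((natLoopB d m acc).1.map (Nat.cast : Nat → Int), ((natLoopB d m acc).2 : Int)) := by
  induction μ with
  | zero => intro d m acc h; omega
  | succ μ IH =>
    intro d m acc hμ hd
    rw [square_factor_alt_loop, natLoopB]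
    by_cases h : d * d ≤ m
    · have hcI : 2 ≤ (d : Int) ∧ (d : Int) * (d : Int) ≤ (m : Int) := by
        refine ⟨by exact_mod_cast hd, by exact_mod_cast h⟩
      rw [dif_pos hcI, dif_pos ⟨hd, h⟩]
      have hf : PySem.Int.floordiv ((natPull d m).1 : Int) 2 = (((natPull d m).1 / 2 : Nat) : Int) := by
        exact_mod_cast PySem.Int.floordiv_natCast (natPull d m).1 2
      have hlt : (natPull d m).2 ≤ m := natPull_le d m
      have hdm : d < m := by nlinarith [hd, h]
      have hIH := IH (d + 1) (natPull d m).2 (acc ++ List.replicate ((natPull d m).1 / 2) d)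
        (by omega) (by omega)
      simp only [bridge_pull m d hd, hf, Int.toNat_natCast]
      rw [List.map_append, List.map_replicate, Nat.cast_add, Nat.cast_one] at hIH
      exact hIH
    · have hcI : ¬ (2 ≤ (d : Int) ∧ (d : Int) * (d : Int) ≤ (m : Int)) := by
        rintro ⟨h1, h2⟩
        exact h (by exact_mod_cast h2)
      rw [dif_neg hcI, dif_neg (fun hh => h hh.2)]

theorem bridge_loopA (μ : Nat) : ∀ (n D : Nat) (acc : List Nat), D + (D + 1 - n * n) < μ → 2 ≤ n →
    square_factor_loop (n : Int) ((n * n : Nat) : Int) (D : Int) (acc.map (Nat.cast : Nat → Int)) =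
      ((natLoopA n D acc).1.map (Nat.cast : Nat → Int), ((natLoopA n D acc).2 : Int)) := by
  induction μ with
  | zero => intro n D acc h; omega
  | succ μ IH =>
    intro n D acc hμ hn
    rw [square_factor_loop, natLoopA]
    have hnn : 4 ≤ n * n := by nlinarith [hn]
    by_cases h : n * n ≤ D
    · have hcI : 2 ≤ (n : Int) ∧ 4 ≤ ((n * n : Nat) : Int) ∧ ((n * n : Nat) : Int) ≤ (D : Int) := by
        refine ⟨by exact_mod_cast hn, by exact_mod_cast hnn, by exact_mod_cast h⟩
      rw [dif_pos hcI, dif_pos ⟨hn, h⟩]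
      by_cases hdvd : n * n ∣ D
      · have hmod : PySem.Int.mod (D : Int) ((n * n : Nat) : Int) = 0 := by
          rw [PySem.Int.mod_natCast]
          exact_mod_cast congrArg (fun k : Nat => (k : Int)) (Nat.eq_zero_of_dvd_of_lt hdvd |> fun _ => Nat.mod_eq_zero_of_dvd hdvd)
        rw [if_pos hmod, if_pos hdvd]
        have hflo : PySem.Int.floordiv (D : Int) ((n * n : Nat) : Int) = ((D / (n * n) : Nat) : Int) :=
          PySem.Int.floordiv_natCast D (n * n)
        rw [hflo]
        have hlt : D / (n * n) < D := Nat.div_lt_self (by omega) (by omega)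
        have hq4 : D / (n * n) ≤ D / 4 := Nat.div_le_div_left hnn (by omega)
        have hIH := IH n (D / (n * n)) (acc ++ [n]) (by omega) hn
        rw [← hIH]
        simp
      · have hmod : ¬ PySem.Int.mod (D : Int) ((n * n : Nat) : Int) = 0 := by
          rw [PySem.Int.mod_natCast]
          intro hz
          exact hdvd (Nat.dvd_of_mod_eq_zero (by exact_mod_cast hz))
        rw [if_neg hmod, if_neg hdvd]
        have hsucc : n * n < (n + 1) * (n + 1) := by nlinarith [hn]
        have hIH := IH (n + 1) D acc (by omega) (by omega)
        rw [← hIH]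
        have hcast : ((n * n : Nat) : Int) + 2 * (n : Int) + 1 = (((n + 1) * (n + 1) : Nat) : Int) := by
          push_cast
          ring
        rw [hcast]
        push_cast
        rfl
    · have hcI : ¬ (2 ≤ (n : Int) ∧ 4 ≤ ((n * n : Nat) : Int) ∧ ((n * n : Nat) : Int) ≤ (D : Int)) := by
        rintro ⟨h1, h2, h3⟩
        exact h (by exact_mod_cast h3)
      rw [dif_neg hcI, dif_neg (fun hh => h hh.2)]

theorem prodSq_cast (l : List Nat) : ∀ (a : Nat),
    (l.map (Nat.cast : Nat → Int)).foldl (fun acc p => acc * (p * p)) (a : Int) =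
      ((l.foldl (fun a p => a * (p * p)) a : Nat) : Int) := by
  induction l with
  | nil => intro a; simp
  | cons x t ih => intro a; simpa using ih (a * (x * x))

-- ===== Nat-level facts =====
theorem natPull_spec (m : Nat) : ∀ (d : Nat), 2 ≤ d → 1 ≤ m →
    m = d ^ (natPull d m).1 * (natPull d m).2 ∧ ¬ d ∣ (natPull d m).2 ∧ 1 ≤ (natPull d m).2 := by
  intro d hd hm
  unfold natPull
  split
  · rename_i h
    have hdvd : d ∣ m := Nat.dvd_of_mod_eq_zero h.2.2
    have hlt : m / d < m := Nat.div_lt_self (by omega) (by omega)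
    have hq : 1 ≤ m / d := Nat.one_le_div_iff (by omega) |>.mpr (Nat.le_of_dvd (by omega) hdvd)
    obtain ⟨h1, h2, h3⟩ := natPull_spec (m / d) d hd hq
    refine ⟨?_, by simpa using h2, by simpa using h3⟩
    have : m = d * (m / d) := (Nat.mul_div_cancel' hdvd).symm
    simp only [pow_succ]
    calc m = d * (m / d) := this
    _ = d * (d ^ (natPull d (m / d)).1 * (natPull d (m / d)).2) := by rw [← h1]
    _ = d ^ (natPull d (m / d)).1 * d * (natPull d (m / d)).2 := by ring
  · rename_i h
    have : ¬ d ∣ m := fun hdvd => h ⟨hd, hm, Nat.eq_zero_of_dvd_of_lt hdvd |> fun _ => Nat.mod_eq_zero_of_dvd hdvd⟩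
    exact ⟨by simp, this, hm⟩
termination_by m
decreasing_by
  rename_i h
  exact Nat.div_lt_self (by omega) (by omega)

-- A's loop makes no further extraction once the dividend is squarefree
theorem loopA_squarefree (μ : Nat) : ∀ (n D : Nat) (acc : List Nat), D + 1 - n * n < μ → 2 ≤ n →
    Squarefree D → natLoopA n D acc = (acc, D) := by
  induction μ with
  | zero => intro n D acc h; omega
  | succ μ ih =>
    intro n D acc hμ hn hsq
    rw [natLoopA]
    split
    · rename_i h
      have hnd : ¬ n * n ∣ D := by
        intro hdvd
        have := Nat.isUnit_iff.mp (hsq n hdvd)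
        omega
      rw [if_neg hnd]
      apply ih _ _ _ _ (by omega) hsq
      have : n * n < (n + 1) * (n + 1) := by nlinarith [hn]
      omega
    · rfl

-- one skip step of A's loop when n*n does not divide the dividend
theorem loopA_skip (d D : Nat) (acc : List Nat) (hd : 2 ≤ d) (hnd : ¬ d * d ∣ D) :
    natLoopA d D acc = natLoopA (d + 1) D acc := by
  conv_lhs => rw [natLoopA]
  by_cases h : 2 ≤ d ∧ d * d ≤ D
  · rw [dif_pos h, if_neg hnd]
  · rw [dif_neg h]
    rw [natLoopA]
    have hsq : d * d ≤ (d + 1) * (d + 1) := by nlinarith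
    rw [dif_neg (by intro h'; exact h ⟨hd, by omega⟩)]

-- A's loop at n = d strips e/2 squares from d^e * K when d does not divide K
theorem loopA_pairs (d : Nat) (hd : 2 ≤ d) : ∀ (e K : Nat) (acc : List Nat), 1 ≤ K → ¬ d ∣ K →
    natLoopA d (d ^ e * K) acc = natLoopA d (d ^ (e % 2) * K) (acc ++ List.replicate (e / 2) d) := by
  intro e
  induction e using Nat.strong_induction_on with
  | _ e IH =>
    intro K acc hK hnd
    by_cases he : 2 ≤ e
    · have hdvd : d * d ∣ d ^ e * K := by
        rw [← pow_two]
        exact Dvd.dvd.mul_right (pow_dvd_pow d (by omega)) K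
      have hpos : 1 ≤ d ^ e * K := Nat.mul_pos (pow_pos (by omega : 0 < d) e) hK
      have hle : d * d ≤ d ^ e * K := Nat.le_of_dvd hpos hdvd
      conv_lhs => rw [natLoopA]
      rw [dif_pos ⟨hd, hle⟩, if_pos hdvd]
      have hquot : d ^ e * K / (d * d) = d ^ (e - 2) * K := by
        have hsplit : d ^ e = d * d * d ^ (e - 2) := by
          rw [← pow_two, ← pow_add]
          congr 1
          omega
        rw [hsplit, mul_assoc, Nat.mul_div_cancel_left _ (by positivity)]
      rw [hquot, IH (e - 2) (by omega) K (acc ++ [d]) hK hnd]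
      have hm : (e - 2) % 2 = e % 2 := by omega
      have hd2 : e / 2 = (e - 2) / 2 + 1 := by omega
      rw [hm, hd2, List.append_assoc, List.replicate_succ]
      rfl
    · have h1 : e % 2 = e := by omega
      have h2 : e / 2 = 0 := by omega
      rw [h1, h2]
      simp

theorem prodSq_append_replicate (l : List Nat) (k d : Nat) :
    prodSq (l ++ List.replicate k d) = prodSq l * (d * d) ^ k := by
  have key : ∀ (k : Nat) (a : Nat), (List.replicate k d).foldl (fun a p => a * (p * p)) a = a * (d * d) ^ k := by
    intro k
    induction k with
    | zero => intro a; simp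
    | succ k ih =>
      intro a
      rw [List.replicate_succ, List.foldl_cons, ih, pow_succ]
      ring
  simp [prodSq, List.foldl_append, key]

-- main invariant: A's interleaved loop on m*r agrees with B's factorizing loop on m,
-- where r is the squarefree product of leftover primes below d already stripped from m
theorem mainInv (μ : Nat) : ∀ (d m r : Nat) (acc : List Nat), m + (m - d) < μ →
    2 ≤ d → 1 ≤ m → 1 ≤ r →
    (∀ k, 2 ≤ k → k < d → ¬ k ∣ m) →
    Squarefree r →
    (∀ p, p.Prime → p ∣ r → p < d) →
    (natLoopA d (m * r) acc).1 = (natLoopB d m acc).1 ∧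
    (natLoopA d (m * r) acc).2 * prodSq (natLoopB d m acc).1 = m * r * prodSq acc := by
  induction μ with
  | zero => intro d m r acc h; omega
  | succ μ ih =>
    intro d m r acc hμ hd hm hr hdivs hsq hprimes
    by_cases hcond : d * d ≤ m
    · -- B's loop still runs
      have hdm : d < m := by nlinarith [hd, hcond]
      by_cases hdp : d.Prime
      · -- prime d: B strips the whole exponent e, A strips e/2 squares then skips
        have hspec := natPull_spec m d hd hm
        rcases hEM : natPull d m with ⟨e, m'⟩
        rw [hEM] at hspec
        dsimp only at hspec
        obtain ⟨heq, hnddm', hm'⟩ := hspec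
        have hndr : ¬ d ∣ r := fun hdr => absurd (hprimes d hdp hdr) (lt_irrefl d)
        have hndK : ¬ d ∣ m' * r := by
          intro hK
          rcases (Nat.Prime.dvd_mul hdp).mp hK with h | h
          exacts [hnddm' h, hndr h]
        have hKpos : 1 ≤ m' * r := Nat.mul_pos hm' hr
        have hmr : m * r = d ^ e * (m' * r) := by rw [heq]; ring
        rw [hmr, loopA_pairs d hd e (m' * r) acc hKpos hndK]
        have hnd2 : ¬ d * d ∣ d ^ (e % 2) * (m' * r) := by
          have h01 : e % 2 = 0 ∨ e % 2 = 1 := by omega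
          rcases h01 with h0 | h1
          · rw [h0, pow_zero, one_mul]
            intro hdd
            exact hndK (dvd_trans (dvd_mul_right d d) hdd)
          · rw [h1, pow_one]
            intro hdd
            exact hndK ((Nat.mul_dvd_mul_iff_left (show 0 < d by omega)).mp hdd)
        rw [loopA_skip d _ _ hd hnd2]
        have hBstep : natLoopB d m acc =
            natLoopB (d + 1) m' (acc ++ List.replicate (e / 2) d) := by
          rw [natLoopB, dif_pos ⟨hd, hcond⟩]
          simp only [hEM]
        rw [hBstep]
        have hre : d ^ (e % 2) * (m' * r) =
            m' * (r * d ^ (e % 2)) := by ring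
        rw [hre]
        have hm'le : m' ≤ m := Nat.le_of_dvd (by omega) ⟨d ^ e, by rw [heq]; ring⟩
        have hr' : 1 ≤ r * d ^ (e % 2) := Nat.mul_pos hr (pow_pos (by omega) _)
        have hdiv' : ∀ k, 2 ≤ k → k < d + 1 → ¬ k ∣ m' := by
          intro k h2 hk hkm'
          rcases Nat.lt_or_ge k d with hlt | hge
          · exact hdivs k h2 hlt (dvd_trans hkm' ⟨d ^ e, by rw [heq]; ring⟩)
          · have hkd : k = d := by omega
            subst hkd
            exact hnddm' hkm'
        have hsq' : Squarefree (r * d ^ (e % 2)) := by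
          have h01 : e % 2 = 0 ∨ e % 2 = 1 := by omega
          rcases h01 with h0 | h1
          · simpa [h0] using hsq
          · rw [h1, pow_one]
            have hcop : Nat.Coprime r d := Nat.Coprime.symm ((hdp.coprime_iff_not_dvd).mpr hndr)
            exact (Nat.squarefree_mul hcop).mpr ⟨hsq, hdp.squarefree⟩
        have hpr' : ∀ p, p.Prime → p ∣ r * d ^ (e % 2) → p < d + 1 := by
          intro p hp hpd
          rcases (Nat.Prime.dvd_mul hp).mp hpd with h | h
          · have := hprimes p hp h
            omega
          · have hpdd : p ∣ d := hp.dvd_of_dvd_pow h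
            have := (Nat.prime_dvd_prime_iff_eq hp hdp).mp hpdd
            omega
        obtain ⟨ihA, ihB⟩ := ih (d + 1) m' (r * d ^ (e % 2))
            (acc ++ List.replicate (e / 2) d)
            (by omega) (by omega) hm' hr' hdiv' hsq' hpr'
        refine ⟨ihA, ?_⟩
        rw [ihB, prodSq_append_replicate]
        have hpow : d ^ (e % 2) * (d * d) ^ (e / 2) = d ^ e := by
          rw [← pow_two, ← pow_mul, ← pow_add]
          congr 1
          omega
        have hra : m' * (r * d ^ (e % 2)) * (prodSq acc * (d * d) ^ (e / 2)) =
            d ^ (e % 2) * (d * d) ^ (e / 2) * (m' * r * prodSq acc) := by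
          ring
        rw [hra, hpow]
        ring
      · -- composite d: neither loop extracts anything
        have hp := Nat.minFac_prime (show d ≠ 1 by omega)
        have hpd : d.minFac ∣ d := Nat.minFac_dvd d
        have hplt : d.minFac < d := by
          rcases Nat.lt_or_ge d.minFac d with h | h
          · exact h
          · have heq : d.minFac = d := Nat.le_antisymm (Nat.minFac_le (by omega)) h
            exact absurd (heq ▸ hp) hdp
        have hpm : ¬ d.minFac ∣ m := hdivs _ hp.two_le hplt
        have hndm : ¬ d ∣ m := fun h => hpm (dvd_trans hpd h)
        have hnd2 : ¬ d * d ∣ m * r := by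
          intro hdd
          have hpp : d.minFac * d.minFac ∣ m * r := dvd_trans (mul_dvd_mul hpd hpd) hdd
          have hcop : Nat.Coprime (d.minFac * d.minFac) m :=
            Nat.Coprime.mul_left ((hp.coprime_iff_not_dvd).mpr hpm) ((hp.coprime_iff_not_dvd).mpr hpm)
          have hppr : d.minFac * d.minFac ∣ r := hcop.dvd_of_dvd_mul_left hpp
          have := Nat.isUnit_iff.mp (hsq _ hppr)
          have := hp.two_le
          omega
        rw [loopA_skip d _ _ hd hnd2]
        have hpull : natPull d m = (0, m) := by
          rw [natPull, dif_neg (fun h => hndm (Nat.dvd_of_mod_eq_zero h.2.2))]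
        have hBstep : natLoopB d m acc = natLoopB (d + 1) m acc := by
          rw [natLoopB, dif_pos ⟨hd, hcond⟩]
          simp [hpull]
        rw [hBstep]
        exact ih (d + 1) m r acc (by omega) (by omega) hm hr
          (fun k h2 hk hkm => by
            rcases Nat.lt_or_ge k d with hlt | hge
            · exact hdivs k h2 hlt hkm
            · have hkd : k = d := by omega
              exact hndm (hkd ▸ hkm))
          hsq (fun p hp' hpr => by have := hprimes p hp' hpr; omega)
    · -- B's loop exits: m is 1 or a prime ≥ d, so m*r is squarefree and A only skips
      have hBexit : natLoopB d m acc = (acc, m) := by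
        rw [natLoopB, dif_neg (fun h => hcond h.2)]
      have hm1 : m = 1 ∨ (m.Prime ∧ d ≤ m) := by
        rcases Nat.lt_or_ge m 2 with h2 | h2
        · left
          omega
        · right
          have hp := Nat.minFac_prime (show m ≠ 1 by omega)
          have hdvdm := Nat.minFac_dvd m
          have hge : d ≤ m.minFac := by
            by_contra hlt
            exact hdivs m.minFac hp.two_le (by omega) hdvdm
          have hprime : m.Prime := by
            by_contra hnp
            have hsq2 := Nat.minFac_sq_le_self (by omega) hnp
            nlinarith [hge, hcond]
          refine ⟨hprime, ?_⟩
          calc d ≤ m.minFac := hge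
          _ ≤ m := Nat.minFac_le (by omega)
      have hsqmr : Squarefree (m * r) := by
        rcases hm1 with h1 | ⟨hpm, hdm⟩
        · simpa [h1] using hsq
        · have hcop : Nat.Coprime m r := (hpm.coprime_iff_not_dvd).mpr (fun hdr => by
            have := hprimes m hpm hdr
            omega)
          exact (Nat.squarefree_mul hcop).mpr ⟨hpm.squarefree, hsq⟩
      rw [loopA_squarefree (m * r + 2) d (m * r) acc (by omega) hd hsqmr, hBexit]
      exact ⟨rfl, rfl⟩



-- ===== VERDICT (by name: the statement is the Claim_ definition above) =====
theorem square_factor_spec : Claim_equal_square_factor := by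
  intro number _
  unfold Spec_square_factor square_factor square_factor_alt
  by_cases h4 : 4 ≤ number
  · -- number ≥ 4: reduce to the Nat loops and apply the main invariant
    have hN : number = ((number.toNat : Nat) : Int) := by omega
    have hN4 : 4 ≤ number.toNat := by omega
    rw [hN, one_mul]
    have hA := bridge_loopA (number.toNat + (number.toNat + 1) + 1) 2 number.toNat []
      (by omega) (by omega)
    have hB := bridge_loopB (number.toNat + 2) 2 number.toNat [] (by omega) (by omega)
    simp only [show ((2 : Nat) : Int) = 2 from rfl, show (((2 * 2 : Nat) : Nat) : Int) = 4 from rfl,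
      List.map_nil] at hA hB
    obtain ⟨hmain1, hmain2⟩ := mainInv (number.toNat + number.toNat + 1) 2 number.toNat 1 []
      (by omega) (by omega) (by omega) (by omega)
      (by intro k h2 hk; omega)
      squarefree_one
      (by intro p hp hpr; have := Nat.dvd_one.mp hpr; omega)
    rw [mul_one] at hmain1 hmain2
    rw [show prodSq ([] : List Nat) = 1 from rfl, mul_one] at hmain2
    rw [hA, hB]
    have hdiv : (List.map (Nat.cast : Nat → Int) (natLoopB 2 number.toNat []).1).foldl
        (fun acc p => acc * (p * p)) 1 = ((prodSq (natLoopB 2 number.toNat []).1 : Nat) : Int) := by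
      have := prodSq_cast (natLoopB 2 number.toNat []).1 1
      simpa [prodSq] using this
    have hP : 0 < prodSq (natLoopB 2 number.toNat []).1 := by
      rcases Nat.eq_zero_or_pos (prodSq (natLoopB 2 number.toNat []).1) with h0 | h0
      · rw [h0, mul_zero] at hmain2
        omega

      · exact h0
    have hquot : number.toNat / prodSq (natLoopB 2 number.toNat []).1 = (natLoopA 2 number.toNat []).2 := by
      exact Nat.div_eq_of_eq_mul_left hP hmain2.symm
    simp only [hdiv, PySem.Int.floordiv_natCast, hquot, hmain1]
  · -- number < 4: both loops exit immediately
    rw [square_factor_loop, dif_neg (by rintro ⟨-, -, hc⟩; omega)]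
    rw [square_factor_alt_loop, dif_neg (by rintro ⟨-, hc⟩; norm_num at hc; omega)]
    simp [PySem.Int.floordiv_eq_ediv_of_pos, one_mul]
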